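-- pv_equiv track=rewrite | github.com/telliott99/flask-webapp | scripts/seq_utils.py | pretty_fmt
-- ===== SOURCE A (Python) =====
-- def chunks(seq,SZ):
--     rL = list()
--     for i in range(0,len(seq),SZ):
--         rL.append(seq[i:i+SZ])
--     return rL
--
-- def fmt_seq(seq,uppercase=True,
--             group_sz=10,groups_per_line=5,
--             as_string = False):
--     # format a sequence
--     # returning a list of elements
--     # containing 5 groups of 10 char
--     if uppercase:
--         seq = seq.upper()
--     rL = list()
--     seqL = chunks(seq,group_sz)
--     for line in chunks(seqL,groups_per_line):
--         rL.append(' '.join(line))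
--     if not as_string:
--         return rL
--     return '\n'.join(rL)
--
-- def reverse_complement(seq):
--     # call on the sequence only, no title
--     # assume it's DNA
--     D = {'a':'t','c':'g','g':'c','t':'a',
--          'A':'T','C':'G','G':'C','T':'A' }
--     rseq = [D[nt] for nt in seq]
--     return ''.join(rseq)
--
-- def pretty_fmt(seq):
--     # printable, double-stranded, numbered seq
--     pL = list()
--     rseq = reverse_complement(seq)
--     seqL = fmt_seq(seq,as_string=False)
--     rseqL = fmt_seq(rseq,as_string=False)
--     # we could cache this info here but for now:
--     line0 = seqL[0]
--     N = len(line0) - line0.count(' ')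
--     for i,(s,r) in enumerate(zip(seqL,rseqL)):
--         sL = [str(N*(i+1)).rjust(len(line0))]
--         sL.extend([s,r])
--         pL.append('\n'.join(sL))
--     return '\n\n'.join(pL)
-- ===== SOURCE B (Python) =====
-- def _groups(s):
--     # split s into 10-char pieces joined by single spaces
--     if len(s) <= 10:
--         return s
--     return s[:10] + ' ' + _groups(s[10:])
--
-- def pretty_fmt(seq):
--     # printable, double-stranded, numbered seq:
--     # consume the uppercased strand and its complement 50 chars at a time
--     D = {'a':'t','c':'g','g':'c','t':'a',
--          'A':'T','C':'G','G':'C','T':'A'}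
--     comp = ''.join([D[nt] for nt in seq])
--     u = seq.upper()
--     ru = comp.upper()
--     first = _groups(u[:50])
--     width = len(first)
--     n_per_line = len(u[:50])
--     blocks = []
--     k = 1
--     while u:
--         blocks.append('\n'.join([str(n_per_line * k).rjust(width),
--                                  _groups(u[:50]), _groups(ru[:50])]))
--         u = u[50:]
--         ru = ru[50:]
--         k += 1
--     return '\n\n'.join(blocks)
-- ===== Notes on version B (the rewrite author's own statement) =====
-- stated objective: simpler
-- what changed: A builds 10-char chunks, re-chunks them into groups of 5, joins, and then enumerates a zip of the two line lists; B consumes the uppercased strand and its complement directly 50 characters per iteration in one loop, forming each line with a small recursive 10-char splitter and taking the number column width and per-line count from the first 50-char slice.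
import Mathlib
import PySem

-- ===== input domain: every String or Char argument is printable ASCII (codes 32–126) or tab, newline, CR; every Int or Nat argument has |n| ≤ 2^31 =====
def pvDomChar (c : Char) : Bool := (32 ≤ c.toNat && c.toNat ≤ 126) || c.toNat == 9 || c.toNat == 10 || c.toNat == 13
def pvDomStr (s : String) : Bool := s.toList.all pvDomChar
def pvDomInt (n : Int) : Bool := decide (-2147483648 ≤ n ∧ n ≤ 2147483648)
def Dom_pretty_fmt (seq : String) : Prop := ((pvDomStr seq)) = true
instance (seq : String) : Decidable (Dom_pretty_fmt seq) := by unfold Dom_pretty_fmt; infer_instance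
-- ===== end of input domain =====

-- B replaces A's chunks-of-chunks-and-enumerate pipeline by a single recursive
-- consume-50-chars-at-a-time loop over both strands (objective: simpler decomposition).


-- ===== PORT A =====
-- shared primitive: Python str.rjust(width) with the default fill (pads with ' ' on the left when shorter; exact)
def pyRjust (cs : List Char) (w : Nat) : List Char :=
  List.replicate (w - cs.length) ' ' ++ cs

-- the dict literal D of reverse_complement (the same literal appears in Source B)
def complementD : PySem.Dict Char Char :=
  PySem.Dict.mk [('a','t'),('c','g'),('g','c'),('t','a'),('A','T'),('C','G'),('G','C'),('T','A')]

-- chunks(seq, SZ)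
def chunksA {α : Type} (seq : List α) (SZ : Int) : List (List α) :=
  (PySem.List.pyRange 0 seq.length SZ).foldl
    (fun rL i => rL ++ [PySem.List.slice seq (some i) (some (i + SZ))]) []

-- fmt_seq(seq, uppercase, group_sz, groups_per_line) on the as_string=False path
-- (pretty_fmt only calls it with as_string=False, so the '\n'.join branch is dead code here)
def fmtSeqA (seq : List Char) (uppercase : Bool) (group_sz groups_per_line : Int) : List (List Char) :=
  let seq' := if uppercase then PySem.Chars.upper seq else seq
  let seqL := chunksA seq' group_sz
  (chunksA seqL groups_per_line).foldl (fun rL line => rL ++ [PySem.Chars.join [' '] line]) []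

-- reverse_complement(seq); D[nt] raises KeyError outside ACGTacgt — excluded by Pre_
def reverseComplementA (seq : List Char) : List Char :=
  seq.map (fun nt => ((PySem.Dict.get? complementD nt).getD nt))

def pretty_fmt (seq : String) : String :=
  let s := seq.toList
  let rseq := reverseComplementA s
  let seqL := fmtSeqA s true 10 5
  let rseqL := fmtSeqA rseq true 10 5
  -- seqL[0] raises IndexError for seq = '' — excluded by Pre_
  let line0 := (PySem.List.pyGet? seqL 0).getD []
  let N : Int := (line0.length : Int) - (PySem.Chars.count line0 [' '] : Int)
  let pL := (PySem.List.enumerate (seqL.zip rseqL) 0).foldl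
    (fun pL p => pL ++ [PySem.Chars.join ['\n']
      [pyRjust (PySem.Int.toChars (N * (p.1 + 1))) line0.length, p.2.1, p.2.2]]) []
  String.ofList (PySem.Chars.join ['\n', '\n'] pL)

-- ===== PORT B =====
-- _groups(s) from Source B
def groupsB (s : List Char) : List Char :=
  if s.length ≤ 10 then s
  else s.take 10 ++ ' ' :: groupsB (s.drop 10)
termination_by s.length
decreasing_by simp_all; omega

-- the while loop of Source B
def blocksB (nper : Int) (width : Nat) (u ru : List Char) (k : Int) : List (List Char) :=
  if u.isEmpty then []
  else
    PySem.Chars.join ['\n']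
      [pyRjust (PySem.Int.toChars (nper * k)) width,
       groupsB (u.take 50), groupsB (ru.take 50)]
    :: blocksB nper width (u.drop 50) (ru.drop 50) (k + 1)
termination_by u.length
decreasing_by simp_all [List.isEmpty_iff]; cases u <;> simp_all <;> omega

def pretty_fmt_alt (seq : String) : String :=
  let s := seq.toList
  let comp := s.map (fun nt => ((PySem.Dict.get? complementD nt).getD nt))
  let u := PySem.Chars.upper s
  let ru := PySem.Chars.upper comp
  let first := groupsB (u.take 50)
  let width := first.length
  let nper : Int := ((u.take 50).length : Int)
  String.ofList (PySem.Chars.join ['\n', '\n'] (blocksB nper width u ru 1))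

-- ===== PRECONDITION & SPEC =====
-- Pre_ excludes exactly where A raises: the empty string (IndexError on seqL[0]) and
-- any character outside ACGTacgt (KeyError in reverse_complement).
def Pre_pretty_fmt (seq : String) : Prop :=
  seq ≠ "" ∧ (seq.toList.all (fun c => (['a', 'c', 'g', 't', 'A', 'C', 'G', 'T'] : List Char).contains c)) = true
instance (seq : String) : Decidable (Pre_pretty_fmt seq) := by unfold Pre_pretty_fmt; infer_instance
def pvWitness_pretty_fmt : String := "ACGTacgt"

def Spec_pretty_fmt (seq : String) (out : String) : Prop := out = pretty_fmt_alt seq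
instance (seq : String) (out : String) : Decidable (Spec_pretty_fmt seq out) := by unfold Spec_pretty_fmt; infer_instance

-- ===== CLAIM (what is proved, stated in full; the proofs are below) =====
def Claim_equal_pretty_fmt : Prop := ∀ (seq : String), Dom_pretty_fmt seq → Pre_pretty_fmt seq → Spec_pretty_fmt seq (pretty_fmt seq)
-- ===== LEMMAS AND PROOFS =====

-- proof-side chunking in natural recursive form
def chunkN {α : Type} (sz : Nat) (l : List α) : List (List α) :=
  if h : l = [] ∨ sz = 0 then [] else l.take sz :: chunkN sz (l.drop sz)
termination_by l.length
decreasing_by push_neg at h; rcases h with ⟨h1, h2⟩; cases l <;> simp_all <;> omega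

theorem chunkN_nil {α : Type} (sz : Nat) : chunkN sz ([] : List α) = [] := by
  rw [chunkN]; simp

theorem chunkN_cons {α : Type} {sz : Nat} (hsz : 0 < sz) {l : List α} (hl : l ≠ []) :
    chunkN sz l = l.take sz :: chunkN sz (l.drop sz) := by
  rw [chunkN]; simp [hl, Nat.pos_iff_ne_zero.mp hsz]

theorem nchunks_step (sz n : Nat) (hsz : 0 < sz) (hn : 0 < n) :
    (n + sz - 1) / sz = (n - sz + sz - 1) / sz + 1 := by
  by_cases h : n ≤ sz
  · have h1 : (n + sz - 1) / sz = 1 := by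
      exact Nat.div_eq_of_lt_le (by omega) (by omega)
    have h2 : (n - sz + sz - 1) / sz = 0 := Nat.div_eq_of_lt (by omega)
    omega
  · have e : n + sz - 1 = (n - sz + sz - 1) + sz := by omega
    rw [e, Nat.add_div_right _ hsz]

theorem goA_eq {α : Type} (sz : Nat) (hsz : 0 < sz) (l : List α) :
    (List.range ((l.length + sz - 1) / sz)).map (fun k => (l.drop (sz * k)).take sz)
      = chunkN sz l := by
  induction hn : l.length using Nat.strong_induction_on generalizing l with
  | _ n ih =>
    subst hn
    rcases eq_or_ne l [] with rfl | hl
    · simp only [chunkN_nil, List.length_nil, List.map_eq_nil_iff, List.range_eq_nil]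
      exact Nat.div_eq_of_lt (by omega)
    · have hn0 : 0 < l.length := List.length_pos_of_ne_nil hl
      rw [chunkN_cons hsz hl, nchunks_step sz l.length hsz hn0, List.range_succ_eq_map]
      simp only [List.map_cons, List.map_map, Nat.mul_zero, List.drop_zero]
      congr 1
      have hlen : (l.drop sz).length = l.length - sz := by simp
      rw [← ih (l.drop sz).length (by omega) (l.drop sz) rfl, hlen]
      apply List.map_congr_left
      intro k _
      simp only [Function.comp_apply, List.drop_drop]
      congr 2
      rw [Nat.mul_succ]
      omega

theorem chunksA_eq {α : Type} (sz : Nat) (hsz : 0 < sz) (l : List α) :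
    chunksA l (sz : Int) = chunkN sz l := by
  unfold chunksA
  rw [PySem.List.pyRange_of_pos _ _ (by exact_mod_cast hsz : (0:Int) < sz), List.foldl_map,
      PySem.List.foldl_append_singleton_eq_map, List.nil_append, ← goA_eq sz hsz l]
  have hm : (if (0:Int) < (l.length : Int) then (((l.length : Int) - 0 + (sz : Int) - 1) / (sz : Int)).toNat else 0)
      = (l.length + sz - 1) / sz := by
    by_cases h0 : l.length = 0
    · simp [h0]
      exact (Nat.div_eq_of_lt (by omega)).symm
    · have hpos : (0:Int) < (l.length : Int) := by exact_mod_cast Nat.pos_of_ne_zero h0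
      rw [if_pos hpos]
      have e : ((l.length : Int) - 0 + (sz : Int) - 1) = ((l.length + sz - 1 : Nat) : Int) := by push_cast <;> omega
      rw [e]
      exact Nat.add_zero _
  rw [hm]
  apply List.map_congr_left
  intro k hk
  have : (0 : Int) + (sz : Int) * (k : Int) = ((sz * k : Nat) : Int) := by push_cast; ring
  rw [this, ← Nat.cast_add, PySem.List.slice_natCast]
  congr 1
  omega

theorem take_chunkN {α : Type} {sz : Nat} (hsz : 0 < sz) :
    ∀ (b : Nat) (l : List α), (chunkN sz l).take b = chunkN sz (l.take (sz * b)) := by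
  intro b
  induction b with
  | zero => intro l; simp [chunkN_nil]
  | succ b ih =>
    intro l
    rcases eq_or_ne l [] with rfl | hl
    · simp [chunkN_nil]
    · rw [chunkN_cons hsz hl, List.take_succ_cons,
        chunkN_cons hsz (by simp [hl]; omega : l.take (sz * (b+1)) ≠ []),
        List.take_take, min_eq_left (Nat.le_mul_of_pos_right sz (Nat.succ_pos b)),
        List.drop_take, ih]
      have e : sz * (b + 1) - sz = sz * b := by rw [Nat.mul_add, Nat.mul_one]; omega
      rw [e]

theorem drop_chunkN {α : Type} {sz : Nat} (hsz : 0 < sz) :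
    ∀ (b : Nat) (l : List α), (chunkN sz l).drop b = chunkN sz (l.drop (sz * b)) := by
  intro b
  induction b with
  | zero => intro l; simp
  | succ b ih =>
    intro l
    rcases eq_or_ne l [] with rfl | hl
    · simp [chunkN_nil]
    · rw [chunkN_cons hsz hl, List.drop_succ_cons, ih, List.drop_drop]
      have e : sz + sz * b = sz * (b + 1) := by rw [Nat.mul_add, Nat.mul_one]; omega
      rw [e]

theorem chunkN_chunkN {α : Type} {a b : Nat} (ha : 0 < a) (hb : 0 < b) (l : List α) :
    chunkN b (chunkN a l) = (chunkN (a * b) l).map (chunkN a) := by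
  induction hn : l.length using Nat.strong_induction_on generalizing l with
  | _ n ih =>
    subst hn
    rcases eq_or_ne l [] with rfl | hl
    · simp [chunkN_nil]
    · have h1 : chunkN a l ≠ [] := by rw [chunkN_cons ha hl]; simp
      rw [chunkN_cons hb h1, take_chunkN ha, drop_chunkN ha,
          chunkN_cons (Nat.mul_pos ha hb) hl, List.map_cons,
          ih (l.drop (a*b)).length (by have h1 := List.length_pos_of_ne_nil hl; have h2 := Nat.mul_pos ha hb; simp; omega) _ rfl]

theorem join_chunk10 (l : List Char) :
    PySem.Chars.join [' '] (chunkN 10 l) = groupsB l := by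
  induction hn : l.length using Nat.strong_induction_on generalizing l with
  | _ n ih =>
    subst hn
    rcases eq_or_ne l [] with rfl | hl
    · rw [chunkN_nil, groupsB]
      simp [PySem.Chars.join_nil]
    · by_cases h10 : l.length ≤ 10
      · rw [chunkN_cons (by omega) hl, List.take_of_length_le h10, List.drop_of_length_le h10,
            chunkN_nil, PySem.Chars.join_singleton, groupsB, if_pos h10]
      · have hdne : l.drop 10 ≠ [] := by
          intro h; apply h10; have := congrArg List.length h; simp at this; omega
        rw [chunkN_cons (by omega) hl, chunkN_cons (by omega : (0:Nat) < 10) hdne,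
            PySem.Chars.join_cons_cons, ← chunkN_cons (by omega : (0:Nat) < 10) hdne,
            ih (l.drop 10).length (by have := List.length_pos_of_ne_nil hl; simp; omega) _ rfl]
        conv_rhs => rw [groupsB]
        rw [if_neg h10]
        simp

theorem fmtSeqA_eq (s : List Char) :
    fmtSeqA s true 10 5 = (chunkN 50 (PySem.Chars.upper s)).map groupsB := by
  unfold fmtSeqA
  simp only [if_pos rfl]
  have h10 : (10 : Int) = ((10 : Nat) : Int) := by norm_num
  have h5 : (5 : Int) = ((5 : Nat) : Int) := by norm_num
  rw [h10, h5, chunksA_eq 10 (by omega), chunksA_eq 5 (by omega),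
      PySem.List.foldl_append_singleton_eq_map, List.nil_append,
      chunkN_chunkN (by omega) (by omega), List.map_map]
  apply List.map_congr_left
  intro b _
  exact join_chunk10 b

theorem count_go_single (c : Char) : ∀ (fuel : Nat) (s : List Char) (acc : Nat),
    s.length ≤ fuel → PySem.Chars.count.go [c] fuel s acc = acc + s.count c := by
  intro fuel
  induction fuel with
  | zero =>
    intro s acc h
    have hs : s = [] := by cases s <;> simp_all
    subst hs
    simp [PySem.Chars.count.go]
  | succ n ih =>
    intro s acc h
    cases s with
    | nil => simp [PySem.Chars.count.go]
    | cons x t =>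
      rw [PySem.Chars.count.go]
      by_cases hx : c = x
      · subst hx
        simp only [List.isPrefixOf, List.isPrefixOf_nil_left, BEq.rfl, Bool.and_self, if_pos]
        rw [List.length_singleton, List.drop_one, List.tail_cons,
            ih t (acc + 1) (by simp only [List.length_cons] at h; omega)]
        simp [List.count_cons]
        omega
      · have : ([c].isPrefixOf (x :: t)) = false := by
          simp [List.isPrefixOf]
          exact fun hcx => absurd hcx hx
        rw [this]
        simp only [Bool.false_eq_true, if_false]
        rw [ih t acc (by simp only [List.length_cons] at h; omega)]
        simp [List.count_cons, Ne.symm hx]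

theorem count_single (c : Char) (s : List Char) :
    PySem.Chars.count s [c] = s.count c := by
  unfold PySem.Chars.count
  simp only [List.isEmpty_cons, Bool.false_eq_true, if_false]
  simpa using count_go_single c s.length s 0 le_rfl

theorem length_groupsB (l : List Char) (h : ' ' ∉ l) :
    (groupsB l).length = l.length + (groupsB l).count ' ' := by
  induction hn : l.length using Nat.strong_induction_on generalizing l with
  | _ n ih =>
    subst hn
    by_cases h10 : l.length ≤ 10
    · rw [groupsB, if_pos h10]
      have : l.count ' ' = 0 := List.count_eq_zero.mpr h
      omega
    · rw [groupsB, if_neg h10]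
      have hdl : ' ' ∉ l.drop 10 := fun hm => h (List.mem_of_mem_drop hm)
      have htl : (l.take 10).count ' ' = 0 :=
        List.count_eq_zero.mpr (fun hm => h (List.mem_of_mem_take hm))
      have := ih (l.drop 10).length (by simp; omega) _ hdl rfl
      simp [List.count_append, List.count_cons, htl]
      simp at this
      omega

theorem blocks_eq (N : Int) (W : Nat) :
    ∀ (u ru : List Char), ru.length = u.length → ∀ (k : Int),
      (PySem.List.enumerate (((chunkN 50 u).map groupsB).zip ((chunkN 50 ru).map groupsB)) k).map
        (fun p => PySem.Chars.join ['\n']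
          [pyRjust (PySem.Int.toChars (N * (p.1 + 1))) W, p.2.1, p.2.2])
      = blocksB N W u ru (k + 1) := by
  intro u
  induction hn : u.length using Nat.strong_induction_on generalizing u with
  | _ n ih =>
    subst hn
    intro ru hlen k
    rcases eq_or_ne u [] with rfl | hu
    · have : ru = [] := List.eq_nil_of_length_eq_zero (by simpa using hlen)
      subst this
      rw [blocksB]
      simp [chunkN_nil, PySem.List.enumerate_nil]
    · have hru : ru ≠ [] := by
        intro h; subst h; exact hu (List.eq_nil_of_length_eq_zero (by simpa using hlen.symm))
      rw [chunkN_cons (by omega) hu, chunkN_cons (by omega) hru, List.map_cons, List.map_cons,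
          List.zip_cons_cons, PySem.List.enumerate_cons, List.map_cons, blocksB]
      have hiE : u.isEmpty = false := by simpa [List.isEmpty_iff] using hu
      rw [hiE]
      simp only [Bool.false_eq_true, if_false]
      congr 1
      have hlen' : (ru.drop 50).length = (u.drop 50).length := by simp [hlen]
      have := ih (u.drop 50).length (by have := List.length_pos_of_ne_nil hu; simp; omega)
        (u.drop 50) rfl (ru.drop 50) hlen' (k + 1)
      rw [this]

-- ===== VERDICT (by name: the statement is the Claim_ definition above) =====
theorem upper_mem_ACGT (s : List Char)
    (hmem : ∀ c ∈ s, c ∈ (['a', 'c', 'g', 't', 'A', 'C', 'G', 'T'] : List Char)) :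
    ∀ c ∈ PySem.Chars.upper s, c ≠ ' ' := by
  intro c hc
  rw [PySem.Chars.upper, List.mem_map] at hc
  obtain ⟨d, hd, rfl⟩ := hc
  have hdm := hmem d hd
  fin_cases hdm <;> decide

theorem pretty_fmt_spec : Claim_equal_pretty_fmt := by
  intro seq hdom hpre
  obtain ⟨hne, hmemb⟩ := hpre
  have hmem : ∀ c ∈ seq.toList, c ∈ (['a', 'c', 'g', 't', 'A', 'C', 'G', 'T'] : List Char) := by
    intro c hc
    simpa using List.all_eq_true.mp hmemb c hc
  have hsne : seq.toList ≠ [] := fun h => hne (String.toList_eq_nil_iff.mp h)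
  unfold Spec_pretty_fmt pretty_fmt pretty_fmt_alt reverseComplementA
  simp only [fmtSeqA_eq]
  have hu : PySem.Chars.upper seq.toList ≠ [] := by
    simp [PySem.Chars.upper, hsne]
  have hline0 :
      (PySem.List.pyGet? ((chunkN 50 (PySem.Chars.upper seq.toList)).map groupsB) 0).getD []
        = groupsB ((PySem.Chars.upper seq.toList).take 50) := by
    rw [chunkN_cons (by omega) hu, List.map_cons]
    simp [pysem]
  rw [hline0]
  have hspace : ' ' ∉ (PySem.Chars.upper seq.toList).take 50 := fun hm =>
    (upper_mem_ACGT seq.toList hmem _ (List.mem_of_mem_take hm)) rfl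
  have hN :
      (((groupsB ((PySem.Chars.upper seq.toList).take 50)).length : Nat) : Int)
        - ((PySem.Chars.count (groupsB ((PySem.Chars.upper seq.toList).take 50)) [' '] : Nat) : Int)
      = (((PySem.Chars.upper seq.toList).take 50).length : Int) := by
    rw [count_single]
    have h1 := length_groupsB _ hspace
    omega
  rw [hN, PySem.List.foldl_append_singleton_eq_map, List.nil_append]
  have hlen : (PySem.Chars.upper (seq.toList.map
      (fun nt => ((PySem.Dict.get? complementD nt).getD nt)))).length
      = (PySem.Chars.upper seq.toList).length := by
    simp [PySem.Chars.upper]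
  have hb := blocks_eq (((PySem.Chars.upper seq.toList).take 50).length : Int)
    ((groupsB ((PySem.Chars.upper seq.toList).take 50)).length)
    (PySem.Chars.upper seq.toList)
    (PySem.Chars.upper (seq.toList.map (fun nt => ((PySem.Dict.get? complementD nt).getD nt))))
    hlen 0
  simp only [zero_add] at hb
  rw [hb]
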